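-- pv_equiv track=rewrite | github.com/PolloRollo/ProjectEuler | problems.py | problem_101
-- ===== SOURCE A (Python) =====
-- def problem_101(n=11):
--     """
--     Find the sum of first incorrect terms (FIT)  for the optimal polynomials upto degree n.
--     """
--     def f(x):
--         return 1 - x + x**2 - x**3 + x**4 - x**5 + x**6 - x**7 + x**8 - x**9 + x**10
--     terms = [f(i) for i in range(1, n+1)]
--     wrong = []
--     for term in range(1, len(terms)):
--         difference = [terms[:term]]
--         while len(difference[-1]) > 1:
--             dif = [difference[-1][i] - difference[-1][i-1] for i in range(1, len(difference[-1]))]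
--             difference.append(dif)
--         for i in range(len(difference)-1, -1, -1):
--             if i == len(difference)-1:
--                 dif = difference[i][0]
--                 difference[i].append(dif)
--             else:
--                 dif = difference[i][-1] + difference[i+1][-1]
--                 difference[i].append(dif)
--         wrong.append(difference[0][-1])
--     return sum(wrong)
-- ===== SOURCE B (Python) =====
-- def problem_101(n=11):
--     """
--     Find the sum of first incorrect terms (FIT) for the optimal polynomials upto degree n.
--     Incremental version: maintain the trailing diagonal of the finite-difference
--     table across prefixes instead of rebuilding the whole table for each prefix.
--     """
--     def f(x):
--         return 1 - x + x**2 - x**3 + x**4 - x**5 + x**6 - x**7 + x**8 - x**9 + x**10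
--     diag = []   # diag[j] = last element of the j-th difference row of the current prefix
--     total = 0
--     for i in range(1, n + 1):
--         if diag:
--             total += sum(diag)  # extrapolated next term of the previous prefix
--         prev = f(i)
--         new_diag = [prev]
--         for d in diag:
--             prev = prev - d
--             new_diag.append(prev)
--         diag = new_diag
--     return total
-- ===== Notes on version B (the rewrite author's own statement) =====
-- stated objective: faster
-- what changed: Instead of rebuilding the whole finite-difference table from scratch for every prefix (and then extending every row), B maintains only the trailing diagonal of last differences, updating it in O(k) per new term and reading off each extrapolated term as the diagonal's sum.
import Mathlib
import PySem

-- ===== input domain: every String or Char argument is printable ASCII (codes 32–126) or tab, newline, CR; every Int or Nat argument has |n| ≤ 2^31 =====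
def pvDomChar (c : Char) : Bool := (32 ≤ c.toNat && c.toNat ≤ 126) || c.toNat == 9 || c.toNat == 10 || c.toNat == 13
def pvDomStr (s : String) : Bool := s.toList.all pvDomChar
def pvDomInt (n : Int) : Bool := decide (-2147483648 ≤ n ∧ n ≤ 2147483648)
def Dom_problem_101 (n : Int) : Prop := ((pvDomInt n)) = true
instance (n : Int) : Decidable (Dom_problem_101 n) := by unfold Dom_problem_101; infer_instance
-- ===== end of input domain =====

-- B replaces A's per-prefix rebuild of the whole finite-difference table by an incrementally
-- maintained trailing diagonal of last differences (objective: faster, O(n^2) vs O(n^3)).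

-- ===== PORT A =====
-- the polynomial f (identical inner helper in both Pythons)
def pvF (x : Int) : Int := 1 - x + x^2 - x^3 + x^4 - x^5 + x^6 - x^7 + x^8 - x^9 + x^10

-- dif = [row[i] - row[i-1] for i in range(1, len(row))]; both indices are always in
-- range (1 ≤ i < len), so pyGetD is exact here
def pvDiffs (r : List Int) : List Int :=
  (PySem.List.pyRange 1 (r.length : Int)).map
    (fun i => PySem.List.pyGetD r i 0 - PySem.List.pyGetD r (i - 1) 0)

theorem pvDiffs_length (r : List Int) : (pvDiffs r).length = r.length - 1 := by
  simp [pvDiffs, pysem]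

-- the while loop: keep appending the difference row while the last row has length > 1
def pvBuildRows (r : List Int) : List (List Int) :=
  if 1 < r.length then r :: pvBuildRows (pvDiffs r) else [r]
termination_by r.length
decreasing_by simp [pvDiffs_length]; omega

-- the backward for loop: rows are extended bottom-up, each getting one appended element;
-- every row reached here is nonempty (prefixes have length ≥ 1), so pyGetD is exact
def pvExtend : List (List Int) → List (List Int)
  | [] => []
  | r :: rest =>
    match pvExtend rest with
    | [] => [r ++ [PySem.List.pyGetD r 0 0]]
    | r' :: rest' => (r ++ [PySem.List.pyGetD r (-1) 0 + PySem.List.pyGetD r' (-1) 0]) :: r' :: rest'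

def problem_101 (n : Int) : Int :=
  let terms := (PySem.List.pyRange 1 (n + 1)).map pvF
  let wrong := (PySem.List.pyRange 1 (terms.length : Int)).map (fun t =>
    PySem.List.pyGetD ((pvExtend (pvBuildRows (PySem.List.slice terms none (some t)))).headD []) (-1) 0)
  wrong.sum

-- ===== PORT B =====
-- loop body of Source B: account the prediction of the previous prefix, then extend the
-- diagonal of last differences with the new term t
def pvStep (st : List Int × Int) (t : Int) : List Int × Int :=
  let total := if st.1 = [] then st.2 else st.2 + st.1.sum
  let res := st.1.foldl (fun (pr : Int × List Int) d => (pr.1 - d, pr.2 ++ [pr.1 - d])) (t, [t])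
  (res.2, total)

def problem_101_alt (n : Int) : Int :=
  ((PySem.List.pyRange 1 (n + 1)).foldl (fun st i => pvStep st (pvF i)) ([], 0)).2

-- ===== PRECONDITION & SPEC =====
def Spec_problem_101 (n : Int) (out : Int) : Prop := out = problem_101_alt n
instance (n : Int) (out : Int) : Decidable (Spec_problem_101 n out) := by unfold Spec_problem_101; infer_instance

-- ===== CLAIM (what is proved, stated in full; the proofs are below) =====
def Claim_equal_problem_101 : Prop := ∀ (n : Int), Dom_problem_101 n → Spec_problem_101 n (problem_101 n)

-- ===== LEMMAS AND PROOFS =====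

-- diagonal of last differences of a prefix, as A materialises it row by row
def pvDiag (xs : List Int) : List Int := (pvBuildRows xs).map (fun r => r.getLastD 0)

-- the new diagonal produced by B's inner loop, as a recursive function
def pvChain (t : Int) : List Int → List Int
  | [] => []
  | d :: ds => (t - d) :: pvChain (t - d) ds

-- running sum of predictions for the proper prefixes of ts
def pvWsum (ts : List Int) : Int :=
  ((PySem.List.pyRange 1 (ts.length : Int)).map (fun t => (pvDiag (ts.take t.toNat)).sum)).sum

theorem pvBuildRows_of_le {r : List Int} (h : ¬ 1 < r.length) : pvBuildRows r = [r] := by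
  rw [pvBuildRows]; simp [h]

theorem pvBuildRows_of_lt {r : List Int} (h : 1 < r.length) :
    pvBuildRows r = r :: pvBuildRows (pvDiffs r) := by
  rw [pvBuildRows]; simp [h]

theorem pvBuildRows_ne_nil (r : List Int) : pvBuildRows r ≠ [] := by
  rw [pvBuildRows]; split <;> simp

theorem pyGetD_append_left (xs ys : List Int) (i : Int) (d : Int) (h0 : 0 ≤ i) (h1 : i < xs.length) :
    PySem.List.pyGetD (xs ++ ys) i d = PySem.List.pyGetD xs i d := by
  rw [PySem.List.pyGetD_eq_getElem _ d h0 (by simp; omega),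
      PySem.List.pyGetD_eq_getElem _ d h0 h1,
      List.getElem_append_left (by omega)]

theorem pvDiffs_concat {xs : List Int} (t : Int) (h : xs ≠ []) :
    pvDiffs (xs ++ [t]) = pvDiffs xs ++ [t - xs.getLastD 0] := by
  have hlen : 1 ≤ xs.length := List.length_pos_of_ne_nil h
  unfold pvDiffs
  have hcast : (((xs ++ [t]).length : Nat) : Int) = (xs.length : Int) + 1 := by simp
  rw [hcast, PySem.List.pyRange_one_succ_right (by exact_mod_cast hlen), List.map_append]
  congr 1
  · apply List.map_congr_left
    intro i hi
    rw [PySem.List.mem_pyRange_one] at hi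
    rw [pyGetD_append_left xs [t] i 0 (by omega) (by omega),
        pyGetD_append_left xs [t] (i-1) 0 (by omega) (by omega)]
  · simp only [List.map_cons, List.map_nil]
    congr 1
    have h1 : PySem.List.pyGetD (xs ++ [t]) (xs.length : Int) 0 = t := by
      rw [PySem.List.pyGetD_eq_getElem _ 0 (by omega) (by simp)]
      simp
    have h2 : PySem.List.pyGetD (xs ++ [t]) ((xs.length : Int) - 1) 0 = xs.getLastD 0 := by
      rw [pyGetD_append_left xs [t] _ 0 (by omega) (by omega)]
      have hm : (xs.length : Int) - 1 = ((xs.length - 1 : Nat) : Int) := by omega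
      rw [hm, PySem.List.pyGetD_natCast]
      simp [List.getD_eq_getElem?_getD, List.getLastD_eq_getLast?, List.getLast?_eq_getElem?]
    rw [h1, h2]

theorem pvDiag_small {xs : List Int} (h : ¬ 1 < xs.length) : pvDiag xs = [xs.getLastD 0] := by
  simp [pvDiag, pvBuildRows_of_le h]

theorem pvDiag_step {xs : List Int} (h : 1 < xs.length) :
    pvDiag xs = xs.getLastD 0 :: pvDiag (pvDiffs xs) := by
  simp [pvDiag, pvBuildRows_of_lt h]

theorem pvDiag_concat : ∀ (N : Nat) (xs : List Int), xs.length ≤ N → xs ≠ [] → ∀ t : Int,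
    pvDiag (xs ++ [t]) = t :: pvChain t (pvDiag xs) := by
  intro N
  induction N with
  | zero => intro xs hle hne t; simp at hle; simp [hle] at hne
  | succ N ih =>
    intro xs hle hne t
    have hx1 : 1 ≤ xs.length := List.length_pos_of_ne_nil hne
    have hbig : 1 < (xs ++ [t]).length := by simp; omega
    by_cases h1 : 1 < xs.length
    · have hdlen : (pvDiffs xs).length = xs.length - 1 := pvDiffs_length xs
      have hdne : pvDiffs xs ≠ [] := by
        apply List.ne_nil_of_length_pos; omega
      rw [pvDiag_step hbig, List.getLastD_concat, pvDiffs_concat t hne,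
          ih (pvDiffs xs) (by omega) hdne, pvDiag_step h1, pvChain]
    · have hx : xs.length = 1 := by omega
      obtain ⟨a, l, rfl⟩ := List.exists_cons_of_ne_nil hne
      have hl : l = [] := by simpa using hx
      subst hl
      rw [pvDiag_step hbig, List.getLastD_concat, pvDiffs_concat t hne,
          pvDiag_small h1]
      have hd : pvDiffs [a] = [] := by
        apply List.eq_nil_of_length_eq_zero; rw [pvDiffs_length]; simp
      rw [hd]
      rw [pvDiag_small (by simp)]
      simp [pvChain]

theorem pvGetLastD_cons_of_ne_nil {α : Type} {l : List α} (h : l ≠ []) (a d : α) :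
    (a :: l).getLastD d = l.getLastD d := by
  obtain ⟨x, l', rfl⟩ := List.exists_cons_of_ne_nil h
  simp

theorem pvPyGetD_neg_one_eq_getLastD {xs : List Int} (h : xs ≠ []) :
    PySem.List.pyGetD xs (-1) 0 = xs.getLastD 0 := by
  rw [PySem.List.pyGetD_neg_one xs 0 h, List.getLastD_eq_getLast?, List.getLast?_eq_some_getLast h]
  rfl

theorem pvBuildRows_good : ∀ (N : Nat) (xs : List Int), xs.length ≤ N → xs ≠ [] →
    (∀ r ∈ pvBuildRows xs, r ≠ []) ∧ ((pvBuildRows xs).getLastD []).length = 1 := by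
  intro N
  induction N with
  | zero => intro xs hle hne; simp at hle; simp [hle] at hne
  | succ N ih =>
    intro xs hle hne
    by_cases h1 : 1 < xs.length
    · have hdlen : (pvDiffs xs).length = xs.length - 1 := pvDiffs_length xs
      have hdne : pvDiffs xs ≠ [] := by apply List.ne_nil_of_length_pos; omega
      obtain ⟨ihall, ihlast⟩ := ih (pvDiffs xs) (by omega) hdne
      rw [pvBuildRows_of_lt h1]
      constructor
      · intro r hr
        rcases List.mem_cons.mp hr with h | h
        · exact h ▸ hne
        · exact ihall r h
      · rwa [pvGetLastD_cons_of_ne_nil (pvBuildRows_ne_nil (pvDiffs xs))]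
    · have hx : xs.length = 1 := by
        have := List.length_pos_of_ne_nil hne; omega
      rw [pvBuildRows_of_le h1]
      exact ⟨by intro r hr; simp at hr; subst hr; exact hne, by simpa using hx⟩

theorem pvExtend_spec : ∀ rows : List (List Int), rows ≠ [] → (∀ r ∈ rows, r ≠ []) →
    (rows.getLastD []).length = 1 →
    ∃ tl, pvExtend rows = ((rows.headD []) ++ [(rows.map (fun r => r.getLastD 0)).sum]) :: tl := by
  intro rows
  induction rows with
  | nil => intro h; exact absurd rfl h
  | cons r rest ih =>
    intro _ hall hlast
    have hr : r ≠ [] := hall r (by simp)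
    cases rest with
    | nil =>
      simp only [List.getLastD_cons, List.getLastD_nil] at hlast
      obtain ⟨a, l, rfl⟩ := List.exists_cons_of_ne_nil hr
      have hl : l = [] := by simpa using hlast
      subst hl
      refine ⟨[], ?_⟩
      simp [pvExtend, PySem.List.pyGetD_zero_cons]
    | cons r2 rest2 =>
      obtain ⟨tl, htl⟩ := ih (by simp)
        (by intro x hx; exact hall x (by simp [hx]))
        (by rwa [pvGetLastD_cons_of_ne_nil (by simp)] at hlast)
      refine ⟨((r2 :: rest2).headD [] ++ [((r2 :: rest2).map (fun r => r.getLastD 0)).sum]) :: tl, ?_⟩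
      have hstep : pvExtend (r :: r2 :: rest2) = match pvExtend (r2 :: rest2) with
        | [] => [r ++ [PySem.List.pyGetD r 0 0]]
        | r' :: rest' => (r ++ [PySem.List.pyGetD r (-1) 0 + PySem.List.pyGetD r' (-1) 0]) :: r' :: rest' := rfl
      rw [hstep, htl]
      simp [pvPyGetD_neg_one_eq_getLastD hr, PySem.List.pyGetD_neg_one_append_singleton]

-- A's wrong-term entry for a nonempty prefix is the sum of the diagonal
theorem pvEntry_eq (xs : List Int) (h : xs ≠ []) :
    PySem.List.pyGetD ((pvExtend (pvBuildRows xs)).headD []) (-1) 0 = (pvDiag xs).sum := by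
  obtain ⟨hne, hlast⟩ := pvBuildRows_good xs.length xs le_rfl h
  obtain ⟨tl, htl⟩ := pvExtend_spec (pvBuildRows xs) (pvBuildRows_ne_nil xs) hne hlast
  rw [htl]
  simp [pvDiag, PySem.List.pyGetD_neg_one_append_singleton]

theorem pvInner_fold (ds : List Int) : ∀ (t : Int) (acc : List Int),
    (ds.foldl (fun (pr : Int × List Int) d => (pr.1 - d, pr.2 ++ [pr.1 - d])) (t, acc)).2
      = acc ++ pvChain t ds := by
  induction ds with
  | nil => intro t acc; simp [pvChain]
  | cons d ds ih => intro t acc; simp [pvChain, ih]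

theorem pvWsum_concat (ts : List Int) (t : Int) :
    pvWsum (ts ++ [t]) = pvWsum ts + (if ts = [] then 0 else (pvDiag ts).sum) := by
  by_cases h : ts = []
  · subst h
    have h1 : pvWsum [t] = 0 := rfl
    have h0 : pvWsum ([] : List Int) = 0 := rfl
    simp [h1, h0]
  · have hlen : 1 ≤ ts.length := List.length_pos_of_ne_nil h
    unfold pvWsum
    have hcast : (((ts ++ [t]).length : Nat) : Int) = (ts.length : Int) + 1 := by simp
    rw [hcast, PySem.List.pyRange_one_succ_right (by exact_mod_cast hlen), List.map_append,
        List.sum_append, if_neg h]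
    congr 1
    · congr 1
      apply List.map_congr_left
      intro k hk
      rw [PySem.List.mem_pyRange_one] at hk
      rw [List.take_append_of_le_length (by omega)]
    · simp [List.take_append_of_le_length le_rfl]

theorem pvFold_invariant : ∀ ts : List Int,
    ts.foldl pvStep ([], 0) = ((if ts = [] then [] else pvDiag ts), pvWsum ts) := by
  intro ts
  induction ts using List.reverseRecOn with
  | nil => simp [show pvWsum [] = 0 from rfl]
  | append_singleton ts t ih =>
    rw [List.foldl_append, List.foldl_cons, List.foldl_nil, ih]
    by_cases h : ts = []
    · subst h
      simp [pvStep, show pvWsum [t] = 0 from rfl, show pvWsum ([] : List Int) = 0 from rfl,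
        pvDiag_small (by simp : ¬ 1 < ([t] : List Int).length)]
    · have hdne : pvDiag ts ≠ [] := by
        unfold pvDiag
        simp [pvBuildRows_ne_nil]
      rw [if_neg h, if_neg (by simp : ¬ ts ++ [t] = [])]
      simp only [pvStep, if_neg hdne, pvInner_fold]
      refine Prod.ext ?_ ?_
      · simpa using (pvDiag_concat ts.length ts le_rfl h t).symm
      · simpa [if_neg h] using (pvWsum_concat ts t).symm

-- ===== VERDICT (by name: the statement is the Claim_ definition above) =====
theorem problem_101_spec : Claim_equal_problem_101 := by
  intro n _
  unfold Spec_problem_101 problem_101 problem_101_alt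
  dsimp only
  rw [← List.foldl_map (f := pvF) (g := pvStep), pvFold_invariant]
  by_cases hT : (PySem.List.pyRange 1 (n + 1)).map pvF = []
  · rw [hT]
    simp [show pvWsum [] = 0 from rfl]
  · rw [if_neg hT]
    have hlen : 1 ≤ ((PySem.List.pyRange 1 (n + 1)).map pvF).length :=
      List.length_pos_of_ne_nil hT
    unfold pvWsum
    congr 1
    apply List.map_congr_left
    intro t ht
    rw [PySem.List.mem_pyRange_one] at ht
    rw [PySem.List.slice_to _ (by omega)]
    apply pvEntry_eq
    apply List.ne_nil_of_length_pos
    simp only [List.length_take]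
    omega
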